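-- pv_equiv track=rewrite | github.com/AndreaBlengino/syndot | syndot/commands/add.py | _find_label_associated_to_path
-- ===== SOURCE A (Python) =====
-- def _find_label_associated_to_path(
--     target_path: str,
--     current_targets: dict[str, list[str]]
-- ) -> str:
--     for label, paths in current_targets.items():
--         if target_path in paths:
--             return label
--     return ' '
-- ===== SOURCE B (Python) =====
-- def _find_label_associated_to_path(
--     target_path: str,
--     current_targets: dict[str, list[str]]
-- ) -> str:
--     reverse_index = {}
--     for label, paths in current_targets.items():
--         for path in paths:
--             reverse_index.setdefault(path, label)
--     return reverse_index.get(target_path, ' ')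
-- ===== Notes on version B (the rewrite author's own statement) =====
-- stated objective: alternative
-- what changed: Replaces the label-by-label membership scan with early return by building a first-wins reverse index (path -> label) over all items and then doing a single dictionary lookup with default ' '.
import Mathlib
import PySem

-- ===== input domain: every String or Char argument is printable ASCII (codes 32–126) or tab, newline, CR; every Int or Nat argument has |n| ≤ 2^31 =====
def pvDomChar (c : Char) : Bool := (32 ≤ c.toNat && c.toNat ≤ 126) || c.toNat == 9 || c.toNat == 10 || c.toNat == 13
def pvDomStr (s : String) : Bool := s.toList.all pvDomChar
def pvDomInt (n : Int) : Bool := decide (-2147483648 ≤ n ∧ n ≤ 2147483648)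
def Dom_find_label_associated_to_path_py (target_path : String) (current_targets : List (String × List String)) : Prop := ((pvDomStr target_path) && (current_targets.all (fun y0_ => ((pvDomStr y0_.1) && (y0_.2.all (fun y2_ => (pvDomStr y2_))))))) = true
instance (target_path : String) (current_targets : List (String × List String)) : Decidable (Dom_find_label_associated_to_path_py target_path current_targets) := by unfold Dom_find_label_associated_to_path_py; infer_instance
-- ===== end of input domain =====

-- B builds a first-wins reverse index (path -> label) and answers with one lookup, instead of A's per-label membership scan with early return; objective: alternative.


-- ===== PORT A =====
def find_label_associated_to_path_py (target_path : String) (current_targets : List (String × List String)) : String :=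
  match current_targets with
  | [] => " "
  | (label, paths) :: rest =>
    if paths.contains target_path then label
    else find_label_associated_to_path_py target_path rest

-- ===== PORT B =====
-- inner loop of B: reverse_index.setdefault(path, label) for each path
def pvAddPaths (d : PySem.Dict String String) (label : String) (paths : List String) : PySem.Dict String String :=
  paths.foldl (fun d path => d.setdefault path label) d

def pvBuildIndex (current_targets : List (String × List String)) : PySem.Dict String String :=
  current_targets.foldl (fun d lp => pvAddPaths d lp.1 lp.2) PySem.Dict.empty

def find_label_associated_to_path_py_alt (target_path : String) (current_targets : List (String × List String)) : String :=
  (pvBuildIndex current_targets).getD target_path " "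

-- ===== PRECONDITION & SPEC =====
def Spec_find_label_associated_to_path_py (target_path : String) (current_targets : List (String × List String)) (out : String) : Prop := out = find_label_associated_to_path_py_alt target_path current_targets
instance (target_path : String) (current_targets : List (String × List String)) (out : String) : Decidable (Spec_find_label_associated_to_path_py target_path current_targets out) := by unfold Spec_find_label_associated_to_path_py; infer_instance

-- ===== CLAIM (what is proved, stated in full; the proofs are below) =====
def Claim_equal_find_label_associated_to_path_py : Prop := ∀ (target_path : String) (current_targets : List (String × List String)), Dom_find_label_associated_to_path_py target_path current_targets → Spec_find_label_associated_to_path_py target_path current_targets (find_label_associated_to_path_py target_path current_targets)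

-- ===== LEMMAS AND PROOFS =====

-- setdefault over a list of paths: lookup = old lookup, else the new label iff the key is among the paths
theorem pvAddPaths_get? (paths : List String) (label : String)
    (d : PySem.Dict String String) (t : String) :
    (pvAddPaths d label paths).get? t
      = ((d.get? t).or (if paths.contains t then some label else none)) := by
  induction paths generalizing d with
  | nil => simp [pvAddPaths]
  | cons p ps ih =>
    show (pvAddPaths (d.setdefault p label) label ps).get? t = _
    rw [ih]
    by_cases hc : d.contains p
    · rw [PySem.Dict.setdefault_of_contains _ _ hc]
      by_cases ht : d.get? t = none
      · simp only [ht, Option.none_or]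
        have hne : t ≠ p := by
          intro h
          subst h
          rw [PySem.Dict.contains_eq_isSome_get?] at hc
          simp [ht] at hc
        simp [hne]
      · obtain ⟨v, hv⟩ := Option.ne_none_iff_exists'.mp ht
        simp [hv]
    · rw [PySem.Dict.setdefault_of_not_contains _ _ (by simpa using hc)]
      by_cases ht : p = t
      · subst ht
        rw [PySem.Dict.get?_insert_self]
        have hd : d.get? p = none := by
          rw [PySem.Dict.contains_eq_isSome_get?] at hc
          simpa using hc
        simp [hd]
      · rw [PySem.Dict.get?_insert_of_ne _ _ (fun h => ht h.symm)]
        have hne : t ≠ p := fun h => ht h.symm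
        simp [hne]

-- A's scan, as an Option-valued first match
def pvScan (target_path : String) (current_targets : List (String × List String)) : Option String :=
  match current_targets with
  | [] => none
  | (label, paths) :: rest =>
    if paths.contains target_path then some label else pvScan target_path rest

theorem pvBuild_get? (cts : List (String × List String)) (d : PySem.Dict String String) (t : String) :
    (cts.foldl (fun d lp => pvAddPaths d lp.1 lp.2) d).get? t = ((d.get? t).or (pvScan t cts)) := by
  induction cts generalizing d with
  | nil => simp [pvScan]
  | cons lp rest ih =>
    simp only [List.foldl_cons]
    rw [ih, pvAddPaths_get?]
    cases lp with
    | mk label paths =>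
      simp only [pvScan]
      by_cases hp : t ∈ paths <;> simp [hp]

theorem pvA_eq_scan (t : String) (cts : List (String × List String)) :
    find_label_associated_to_path_py t cts = (pvScan t cts).getD " " := by
  induction cts with
  | nil => rfl
  | cons lp rest ih =>
    cases lp with
    | mk label paths =>
      simp only [find_label_associated_to_path_py, pvScan]
      by_cases hp : t ∈ paths <;> simp [hp, ih]

-- ===== VERDICT (by name: the statement is the Claim_ definition above) =====
theorem find_label_associated_to_path_py_spec : Claim_equal_find_label_associated_to_path_py := by
  intro t cts _
  show find_label_associated_to_path_py t cts = find_label_associated_to_path_py_alt t cts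
  rw [pvA_eq_scan, find_label_associated_to_path_py_alt, PySem.Dict.getD_eq_get?_getD,
    pvBuildIndex, pvBuild_get?]
  simp
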